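-- pv_equiv track=rewrite | github.com/pearlli98/coding_interview_2022 | coding_interviews/plaid/impl_v1.py | getRecurringTransactions
-- ===== SOURCE A (Python) =====
-- def getRecurringTransactions(array):
--     amount_dict = {}
--     time_dict = {}
--     recurring_transactions = []
--
--     for description, amount, time in array:
--         amount_dict[description] = amount_dict.get(description, []) + [amount]
--         time_dict[description] = time_dict.get(description, []) + [time]
--
--     for description in amount_dict.keys():
--         #check at least 3 times
--         if len(amount_dict[description]) < 3:
--             continue
--
--         #check for same amount
--         if len(set(amount_dict[description])) != 1:
--             continue
--
--         #check for same interval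
--         current_time_dict = time_dict[description]
--         interval = current_time_dict[1] - current_time_dict[0]
--         index = 2
--         recurring = True
--
--         while index < len(current_time_dict):
--             if current_time_dict[index] - current_time_dict[index - 1] != interval:
--                 recurring = False
--                 break
--             index += 1
--
--         if recurring:
--             recurring_transactions.append(description)
--
--     return recurring_transactions
-- ===== SOURCE B (Python) =====
-- def getRecurringTransactions(array):
--     # one streaming pass: per-description summary record instead of full lists
--     state = {}
--     for description, amount, time in array:
--         rec = state.get(description)
--         if rec is None:
--             state[description] = (1, amount, True, time, 0, True)
--         else:
--             count, first, same, prev, interval, ok = rec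
--             same = same and amount == first
--             if count == 1:
--                 state[description] = (count + 1, first, same, time, time - prev, ok)
--             else:
--                 state[description] = (count + 1, first, same, time, interval,
--                                       ok and time - prev == interval)
--     return [d for d, (count, _, same, _, _, ok) in state.items()
--             if count >= 3 and same and ok]
-- ===== Notes on version B (the rewrite author's own statement) =====
-- stated objective: alternative
-- what changed: Replaces A's two-phase build-full-amount/time-lists-then-validate with a single streaming pass keeping one constant-size summary record (count, first amount, same-amount flag, previous time, interval, interval-ok flag) per description, then collects qualifying descriptions in insertion order.
import Mathlib
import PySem

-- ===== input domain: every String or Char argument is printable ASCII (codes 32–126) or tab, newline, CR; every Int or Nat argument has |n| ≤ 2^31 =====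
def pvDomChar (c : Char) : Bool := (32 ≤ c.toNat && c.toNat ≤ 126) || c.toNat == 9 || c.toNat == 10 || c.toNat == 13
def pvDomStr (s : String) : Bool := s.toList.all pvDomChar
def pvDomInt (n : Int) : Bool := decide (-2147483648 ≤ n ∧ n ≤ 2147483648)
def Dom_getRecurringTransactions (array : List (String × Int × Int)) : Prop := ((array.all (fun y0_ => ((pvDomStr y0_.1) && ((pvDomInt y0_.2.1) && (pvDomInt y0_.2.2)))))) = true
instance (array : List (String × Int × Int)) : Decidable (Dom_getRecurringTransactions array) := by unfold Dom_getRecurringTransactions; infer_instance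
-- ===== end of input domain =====

-- B replaces A's build-full-lists-then-validate with one streaming pass keeping a
-- constant-size summary record per description (alternative decomposition, not timed faster).

-- ===== PORT A =====

-- the inner `while index < len(...)` loop of A (index is the Nat counter, cast for indexing)
def pvWhileA (ts : List Int) (iv : Int) (i : Nat) : Bool :=
  if _h : i < ts.length then
    if PySem.List.pyGetD ts (i : Int) 0 - PySem.List.pyGetD ts ((i : Int) - 1) 0 ≠ iv then false
    else pvWhileA ts iv (i + 1)
  else true
termination_by ts.length - i

def getRecurringTransactions (array : List (String × Int × Int)) : List String :=
  let dicts := array.foldl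
    (fun (st : PySem.Dict String (List Int) × PySem.Dict String (List Int)) x =>
      (st.1.insert x.1 (st.1.getD x.1 [] ++ [x.2.1]),
       st.2.insert x.1 (st.2.getD x.1 [] ++ [x.2.2])))
    (PySem.Dict.empty, PySem.Dict.empty)
  let amount_dict := dicts.1
  let time_dict := dicts.2
  amount_dict.keys.foldl
    (fun acc description =>
      if (amount_dict.getD description []).length < 3 then acc
      else if (PySem.Set.ofList (amount_dict.getD description [])).length ≠ 1 then acc
      else
        let current := time_dict.getD description []
        let interval := PySem.List.pyGetD current 1 0 - PySem.List.pyGetD current 0 0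
        if pvWhileA current interval 2 then acc ++ [description] else acc)
    []

-- ===== PORT B =====

-- summary record: (count, first amount, same-amount flag, previous time, interval, interval-ok flag)
def pvUpd : (Int × Int × Bool × Int × Int × Bool) → Int × Int → (Int × Int × Bool × Int × Int × Bool)
  | (count, first, same, prev, interval, ok), (amount, time) =>
    let same' := same && (amount == first)
    if count == 1 then (count + 1, first, same', time, time - prev, ok)
    else (count + 1, first, same', time, interval, ok && (time - prev == interval))

def getRecurringTransactions_alt (array : List (String × Int × Int)) : List String :=
  let state := array.foldl
    (fun (st : PySem.Dict String (Int × Int × Bool × Int × Int × Bool)) x =>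
      match st.get? x.1 with
      | none => st.insert x.1 (1, x.2.1, true, x.2.2, 0, true)
      | some r => st.insert x.1 (pvUpd r x.2))
    PySem.Dict.empty
  (state.items.filter
    (fun p => decide (3 ≤ p.2.1) && p.2.2.2.1 && p.2.2.2.2.2.2)).map (·.1)

-- ===== PRECONDITION & SPEC =====
def Spec_getRecurringTransactions (array : List (String × Int × Int)) (out : List String) : Prop := out = getRecurringTransactions_alt array
instance (array : List (String × Int × Int)) (out : List String) : Decidable (Spec_getRecurringTransactions array out) := by unfold Spec_getRecurringTransactions; infer_instance

-- ===== CLAIM (what is proved, stated in full; the proofs are below) =====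
def Claim_equal_getRecurringTransactions : Prop := ∀ (array : List (String × Int × Int)), Dom_getRecurringTransactions array → Spec_getRecurringTransactions array (getRecurringTransactions array)

-- ===== LEMMAS AND PROOFS =====

-- A's and B's per-step dict updates, written as "insert at x.1 a value of the old binding and x.2"
def pvUpdAmt (o : Option (List Int)) (p : Int × Int) : List Int := o.getD [] ++ [p.1]
def pvUpdTime (o : Option (List Int)) (p : Int × Int) : List Int := o.getD [] ++ [p.2]
def pvInit? (o : Option (Int × Int × Bool × Int × Int × Bool)) (p : Int × Int) :
    Int × Int × Bool × Int × Int × Bool :=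
  match o with
  | none => (1, p.1, true, p.2, 0, true)
  | some r => pvUpd r p

def pvChainStep (iv : Int) (st : Int × Bool) (t : Int) : Int × Bool := (t, st.2 && (t - st.1 == iv))

def pvChain (iv p : Int) : List Int → Bool
  | [] => true
  | t :: ts => if t - p == iv then pvChain iv t ts else false

-- the closed-form summary record that B's fold computes for one description
def pvSpecB (w : Int × Int) (m : List (String × Int × Int)) : Int × Int × Bool × Int × Int × Bool :=
  match m with
  | [] => (1, w.1, true, w.2, 0, true)
  | z :: mm =>
    let iv := z.2.2 - w.2
    let pr := (mm.map (fun y => y.2.2)).foldl (pvChainStep iv) (z.2.2, true)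
    ((1 + (m.length : Int)), w.1, m.all (fun y => y.2.1 == w.1), pr.1, iv, pr.2)

def pvPairs (array : List (String × Int × Int)) (k : String) : List (String × Int × Int) :=
  array.filter (fun x => x.1 == k)

def pvKeys (array : List (String × Int × Int)) : List String :=
  PySem.Set.ofList (array.map (fun x => x.1))

def pvCondB (array : List (String × Int × Int)) (k : String) : Bool :=
  match pvPairs array k with
  | [] => false
  | w :: m =>
    let r := pvSpecB w.2 m
    decide (3 ≤ r.1) && r.2.2.1 && r.2.2.2.2.2

-- generic: get? after a fold that inserts at key x.1 a value of the old binding and x.2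
theorem pvGet?_foldl {ν : Type} (f : Option ν → (Int × Int) → ν)
    (l : List (String × Int × Int)) (d : PySem.Dict String ν) (c : String) :
    (l.foldl (fun st x => st.insert x.1 (f (st.get? x.1) x.2)) d).get? c
    = (l.filter (fun x => x.1 == c)).foldl (fun o x => some (f o x.2)) (d.get? c) := by
  induction l generalizing d with
  | nil => rfl
  | cons x l ih =>
    simp only [List.foldl_cons, List.filter_cons]
    by_cases h : x.1 = c
    · subst h
      simp only [BEq.rfl, if_pos trivial, List.foldl_cons, ih]
      rw [PySem.Dict.get?_insert_self]
    · have : (x.1 == c) = false := by simp [h]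
      simp only [this, Bool.false_eq_true, if_false, ih]
      rw [PySem.Dict.get?_insert_of_ne (hne := Ne.symm h)]

theorem pvFoldSome {ν : Type} (f : Option ν → (Int × Int) → ν)
    (l : List (String × Int × Int)) (r : ν) :
    l.foldl (fun o x => some (f o x.2)) (some r)
    = some (l.foldl (fun r x => f (some r) x.2) r) := by
  induction l generalizing r with
  | nil => rfl
  | cons x l ih => simp only [List.foldl_cons, ih]

theorem pvFoldAppendMap (g : Int × Int → Int) (l : List (String × Int × Int)) (acc : List Int) :
    l.foldl (fun (o : Option (List Int)) x => some (o.getD [] ++ [g x.2])) (some acc)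
    = some (acc ++ l.map (fun x => g x.2)) := by
  induction l generalizing acc with
  | nil => simp
  | cons x l ih => simp [List.foldl_cons, ih]

theorem pvFoldAmt (l : List (String × Int × Int)) (acc : List Int) :
    l.foldl (fun (o : Option (List Int)) x => some (o.getD [] ++ [x.2.1])) (some acc)
    = some (acc ++ l.map (fun x => x.2.1)) := pvFoldAppendMap (fun p => p.1) l acc

theorem pvFoldTime (l : List (String × Int × Int)) (acc : List Int) :
    l.foldl (fun (o : Option (List Int)) x => some (o.getD [] ++ [x.2.2])) (some acc)
    = some (acc ++ l.map (fun x => x.2.2)) := pvFoldAppendMap (fun p => p.2) l acc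

theorem pvChainFold_false (iv p : Int) (l : List Int) :
    (l.foldl (pvChainStep iv) (p, false)).2 = false := by
  induction l generalizing p with
  | nil => rfl
  | cons t l ih => simpa [pvChainStep] using ih t

theorem pvChain_eq_fold (iv : Int) (l : List Int) (p : Int) :
    pvChain iv p l = (l.foldl (pvChainStep iv) (p, true)).2 := by
  induction l generalizing p with
  | nil => rfl
  | cons t l ih =>
    by_cases h : (t - p == iv) = true
    · simp [pvChain, pvChainStep, h, ih t]
    · simp only [Bool.not_eq_true] at h
      simp [pvChain, pvChainStep, h, pvChainFold_false]

theorem pvWhileA_eq_chain (ts : List Int) (iv : Int) :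
    ∀ (i : Nat), 1 ≤ i → pvWhileA ts iv i = pvChain iv (ts.getD (i-1) 0) (ts.drop i) := by
  intro i hi
  induction hn : ts.length - i using Nat.strong_induction_on generalizing i with
  | _ n ih =>
  rw [pvWhileA]
  by_cases h : i < ts.length
  · have hcast : ((i : Int) - 1) = ((i - 1 : Nat) : Int) := by omega
    have h1 : PySem.List.pyGetD ts (i : Int) 0 = ts.getD i 0 := by
      simp [PySem.List.pyGetD_natCast]
    have h2 : PySem.List.pyGetD ts ((i : Int) - 1) 0 = ts.getD (i-1) 0 := by
      rw [hcast]; simp [PySem.List.pyGetD_natCast]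
    have hdrop : ts.drop i = ts[i] :: ts.drop (i+1) := List.drop_eq_getElem_cons h
    have hgd : ts.getD i 0 = ts[i] := by rw [List.getD_eq_getElem?_getD]; simp [h]
    rw [dif_pos h, h1, h2, hdrop, ← hgd]
    simp only [pvChain]
    by_cases hc : ts.getD i 0 - ts.getD (i-1) 0 = iv
    · rw [if_neg (by simpa using hc), if_pos (by simpa using hc)]
      rw [ih (ts.length - (i+1)) (by omega) (i+1) (by omega) rfl]
      simp
    · rw [if_pos (by simpa using hc), if_neg (by simpa using hc)]
  · rw [dif_neg h]
    rw [List.drop_of_length_le (by omega)]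
    rfl

theorem pvFoldB_eq_spec (w : Int × Int) (m : List (String × Int × Int)) :
    m.foldl (fun r x => pvUpd r x.2) (1, w.1, true, w.2, 0, true) = pvSpecB w m := by
  induction m using List.reverseRecOn with
  | nil => rfl
  | append_singleton m y ih =>
    rw [List.foldl_append, List.foldl_cons, List.foldl_nil, ih]
    cases m with
    | nil =>
      simp [pvSpecB, pvUpd]
    | cons z mm =>
      show pvUpd (pvSpecB w (z :: mm)) y.2 = pvSpecB w (z :: (mm ++ [y]))
      simp only [pvSpecB, pvUpd, List.map_append, List.foldl_append,
        List.length_append, List.length_cons, List.all_append, List.all_cons,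
        List.all_nil, List.foldl_cons, List.foldl_nil, List.map_cons, List.map_nil]
      rw [if_neg (by simp only [beq_iff_eq]; push_cast; omega)]
      simp only [pvChainStep, Bool.and_true, Prod.mk.injEq]
      exact ⟨by push_cast [List.length_nil]; ring, trivial, by rw [Bool.and_assoc], trivial⟩

theorem pvLen_le_foldl_add (as : List Int) : ∀ (s : PySem.Set Int),
    s.length ≤ (as.foldl PySem.Set.add s).length := by
  induction as with
  | nil => intro s; simp
  | cons y as ih =>
    intro s
    refine le_trans ?_ (ih (PySem.Set.add s y))
    simp only [PySem.Set.add]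
    split_ifs <;> simp

theorem pvFoldlAdd_len_one (as : List Int) (a : Int) :
    ((as.foldl PySem.Set.add [a]).length = 1) ↔ (∀ y ∈ as, y = a) := by
  induction as with
  | nil => simp
  | cons y as ih =>
    by_cases h : y = a
    · subst h
      have h1 : PySem.Set.add [y] y = [y] := by simp [PySem.Set.add]
      simp [ih]
    · have hadd : PySem.Set.add [a] y = [a, y] := by
        simp only [PySem.Set.add]
        rw [if_neg (by simp [h])]; rfl
      constructor
      · intro hlen
        exfalso
        have := pvLen_le_foldl_add as [a, y]
        rw [List.foldl_cons, hadd] at hlen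
        simp at this; omega
      · intro hall
        exact absurd (hall y (by simp)) h

theorem pvSetLenOne (a : Int) (as : List Int) :
    ((PySem.Set.ofList (a :: as)).length = 1) ↔ (∀ y ∈ as, y = a) := by
  rw [PySem.Set.ofList_eq_foldl, List.foldl_cons]
  have h0 : PySem.Set.add [] a = [a] := by simp [PySem.Set.add]
  rw [h0, pvFoldlAdd_len_one]

theorem pvLoopA (keys : List String) (c1 c2 : String → Prop) [DecidablePred c1]
    [DecidablePred c2] (c3 : String → Bool) (acc : List String) :
    keys.foldl (fun acc d => if c1 d then acc else if c2 d then acc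
      else if c3 d then acc ++ [d] else acc) acc
    = acc ++ keys.filter (fun d => (!(decide (c1 d)) && !(decide (c2 d))) && c3 d) := by
  induction keys generalizing acc with
  | nil => simp
  | cons k keys ih =>
    rw [List.foldl_cons, List.filter_cons]
    by_cases h1 : c1 k
    · simp [h1, ih]
    · by_cases h2 : c2 k
      · simp [h1, h2, ih]
      · by_cases h3 : c3 k = true
        · simp [h1, h2, h3, ih]
        · simp only [Bool.not_eq_true] at h3
          simp [h1, h2, h3, ih]

theorem pvStepB_eq :
    (fun (st : PySem.Dict String (Int × Int × Bool × Int × Int × Bool)) (x : String × Int × Int) =>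
      match st.get? x.1 with
      | none => st.insert x.1 (1, x.2.1, true, x.2.2, 0, true)
      | some r => st.insert x.1 (pvUpd r x.2))
    = (fun st x => st.insert x.1 (pvInit? (st.get? x.1) x.2)) := by
  funext st x
  cases st.get? x.1 <;> simp [pvInit?]

theorem pvStateB_get? (array : List (String × Int × Int)) (k : String) :
    (array.foldl (fun st x => st.insert x.1 (pvInit? (st.get? x.1) x.2))
      (PySem.Dict.empty : PySem.Dict String (Int × Int × Bool × Int × Int × Bool))).get? k
    = match pvPairs array k with
      | [] => none
      | w :: m => some (pvSpecB w.2 m) := by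
  rw [pvGet?_foldl pvInit? array PySem.Dict.empty k, PySem.Dict.get?_empty]
  show (pvPairs array k).foldl (fun o x => some (pvInit? o x.2)) none = _
  cases hp : pvPairs array k with
  | nil => rfl
  | cons w m =>
    rw [List.foldl_cons]
    show m.foldl (fun o x => some (pvInit? o x.2)) (some (1, w.2.1, true, w.2.2, 0, true)) = _
    rw [pvFoldSome pvInit? m]
    show some (m.foldl (fun r x => pvUpd r x.2) (1, w.2.1, true, w.2.2, 0, true)) = _
    rw [pvFoldB_eq_spec w.2 m]

theorem pvB_eq (array : List (String × Int × Int)) :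
    getRecurringTransactions_alt array = (pvKeys array).filter (pvCondB array) := by
  unfold getRecurringTransactions_alt
  rw [pvStepB_eq]
  have hkeys : (array.foldl (fun st x => st.insert x.1 (pvInit? (st.get? x.1) x.2))
      (PySem.Dict.empty : PySem.Dict String (Int × Int × Bool × Int × Int × Bool))).keys
      = pvKeys array := by
    have := PySem.Dict.keys_foldl_insert_key array (fun x => x.1)
      (fun st x => pvInit? (st.get? x.1) x.2) PySem.Dict.empty
    rw [this, PySem.Dict.keys_empty]
    rfl
  have hnd : (array.foldl (fun st x => st.insert x.1 (pvInit? (st.get? x.1) x.2))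
      (PySem.Dict.empty : PySem.Dict String (Int × Int × Bool × Int × Int × Bool))).keys.Nodup := by
    exact PySem.Dict.nodup_keys_foldl_insert_key array (fun x => x.1) _ _
      (by rw [PySem.Dict.keys_empty]; exact List.nodup_nil)
  show ((array.foldl (fun st x => st.insert x.1 (pvInit? (st.get? x.1) x.2))
      PySem.Dict.empty).items.filter
      (fun p => decide (3 ≤ p.2.1) && p.2.2.2.1 && p.2.2.2.2.2.2)).map (fun x => x.1)
      = (pvKeys array).filter (pvCondB array)
  rw [PySem.Dict.items_eq_map_keys _ hnd (0, 0, true, 0, 0, true), List.filter_map, List.map_map]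
  have hid : ((fun p => p.1) ∘ fun k => (k, (array.foldl (fun st x => st.insert x.1 (pvInit? (st.get? x.1) x.2)) PySem.Dict.empty).getD k (0, 0, true, 0, 0, true))) = (id : String → String) := rfl
  rw [hid, List.map_id, hkeys]
  apply List.filter_congr
  intro k hk
  have hkmem : k ∈ array.map (fun x => x.1) := (PySem.Set.mem_ofList _ _).mp hk
  have hne : pvPairs array k ≠ [] := by
    simp only [pvPairs, ne_eq, List.filter_eq_nil_iff]
    intro hall
    obtain ⟨x, hx, hx1⟩ := List.mem_map.mp hkmem
    exact hall x hx (by simp [hx1])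
  cases hp : pvPairs array k with
  | nil => exact absurd hp hne
  | cons w m =>
    have hget := pvStateB_get? array k
    rw [hp] at hget
    have hgd := PySem.Dict.getD_of_get?_eq_some _ (0, 0, true, 0, 0, true) hget
    simp only [Function.comp_apply, hgd, pvCondB, hp]

theorem pvA_eq (array : List (String × Int × Int)) :
    getRecurringTransactions array = (pvKeys array).filter (pvCondB array) := by
  unfold getRecurringTransactions
  have hpair : (fun (st : PySem.Dict String (List Int) × PySem.Dict String (List Int))
      (x : String × Int × Int) =>
      (st.1.insert x.1 (st.1.getD x.1 [] ++ [x.2.1]),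
       st.2.insert x.1 (st.2.getD x.1 [] ++ [x.2.2])))
      = (fun st x => (st.1.insert x.1 (pvUpdAmt (st.1.get? x.1) x.2),
                      st.2.insert x.1 (pvUpdTime (st.2.get? x.1) x.2))) := by
    funext st x
    simp [pvUpdAmt, pvUpdTime, PySem.Dict.getD_eq_get?_getD]
  rw [hpair]
  simp only [PySem.List.foldl_prod_mk
    (fun (d : PySem.Dict String (List Int)) (x : String × Int × Int) =>
      d.insert x.1 (pvUpdAmt (d.get? x.1) x.2))
    (fun (d : PySem.Dict String (List Int)) (x : String × Int × Int) =>
      d.insert x.1 (pvUpdTime (d.get? x.1) x.2))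
    array PySem.Dict.empty PySem.Dict.empty]
  set dA := List.foldl (fun (d : PySem.Dict String (List Int)) (x : String × Int × Int) =>
    d.insert x.1 (pvUpdAmt (d.get? x.1) x.2)) PySem.Dict.empty array with hdA
  set dT := List.foldl (fun (d : PySem.Dict String (List Int)) (x : String × Int × Int) =>
    d.insert x.1 (pvUpdTime (d.get? x.1) x.2)) PySem.Dict.empty array with hdT
  rw [pvLoopA dA.keys (fun d => (dA.getD d []).length < 3)
    (fun d => (PySem.Set.ofList (dA.getD d [])).length ≠ 1)
    (fun d => pvWhileA (dT.getD d [])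
      (PySem.List.pyGetD (dT.getD d []) 1 0 - PySem.List.pyGetD (dT.getD d []) 0 0) 2) []]
  rw [List.nil_append]
  have hkeysA : dA.keys = pvKeys array := by
    rw [hdA, PySem.Dict.keys_foldl_insert_key array (fun x => x.1)
      (fun d x => pvUpdAmt (d.get? x.1) x.2) PySem.Dict.empty, PySem.Dict.keys_empty]
    rfl
  rw [hkeysA]
  apply List.filter_congr
  intro k hk
  have hkmem : k ∈ array.map (fun x => x.1) := (PySem.Set.mem_ofList _ _).mp hk
  have hne : pvPairs array k ≠ [] := by
    simp only [pvPairs, ne_eq, List.filter_eq_nil_iff]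
    intro hall
    obtain ⟨x, hx, hx1⟩ := List.mem_map.mp hkmem
    exact hall x hx (by simp [hx1])
  cases hp : pvPairs array k with
  | nil => exact absurd hp hne
  | cons w m =>
    have h1 : dA.get? k = some (w.2.1 :: m.map (fun x => x.2.1)) := by
      rw [hdA, pvGet?_foldl pvUpdAmt array PySem.Dict.empty k, PySem.Dict.get?_empty]
      show (pvPairs array k).foldl (fun o x => some (pvUpdAmt o x.2)) none = _
      rw [hp, List.foldl_cons]
      show m.foldl (fun o x => some (o.getD [] ++ [x.2.1])) (some [w.2.1]) = _
      rw [pvFoldAmt m [w.2.1]]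
      simp
    have h2 : dT.get? k = some (w.2.2 :: m.map (fun x => x.2.2)) := by
      rw [hdT, pvGet?_foldl pvUpdTime array PySem.Dict.empty k, PySem.Dict.get?_empty]
      show (pvPairs array k).foldl (fun o x => some (pvUpdTime o x.2)) none = _
      rw [hp, List.foldl_cons]
      show m.foldl (fun o x => some (o.getD [] ++ [x.2.2])) (some [w.2.2]) = _
      rw [pvFoldTime m [w.2.2]]
      simp
    have hGA : dA.getD k [] = w.2.1 :: m.map (fun x => x.2.1) :=
      PySem.Dict.getD_of_get?_eq_some _ _ h1
    have hGT : dT.getD k [] = w.2.2 :: m.map (fun x => x.2.2) :=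
      PySem.Dict.getD_of_get?_eq_some _ _ h2
    simp only [hGA, hGT, pvCondB, hp]
    cases m with
    | nil => simp [pvSpecB]
    | cons z mm =>
      have e1 : (!decide ((w.2.1 :: List.map (fun x => x.2.1) (z :: mm)).length < 3))
          = decide (3 ≤ (pvSpecB w.2 (z :: mm)).1) := by
        rw [← decide_not, decide_eq_decide]
        simp only [pvSpecB, List.length_cons, List.length_map]
        push_cast
        omega
      have e2 : (!decide ((PySem.Set.ofList (w.2.1 :: List.map (fun x => x.2.1) (z :: mm))).length ≠ 1))
          = (pvSpecB w.2 (z :: mm)).2.2.1 := by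
        rw [Bool.eq_iff_iff]
        simp only [pvSpecB, Bool.not_eq_true', decide_eq_false_iff_not, ne_eq, not_not,
          pvSetLenOne, List.all_eq_true, List.mem_map, beq_iff_eq, forall_exists_index, and_imp]
        constructor
        · intro h y hy
          exact h _ y hy rfl
        · intro h y x hx hxy
          subst hxy
          exact h x hx
      have e3 : pvWhileA (w.2.2 :: List.map (fun x => x.2.2) (z :: mm))
          (PySem.List.pyGetD (w.2.2 :: List.map (fun x => x.2.2) (z :: mm)) 1 0 -
            PySem.List.pyGetD (w.2.2 :: List.map (fun x => x.2.2) (z :: mm)) 0 0) 2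
          = (pvSpecB w.2 (z :: mm)).2.2.2.2.2 := by
        have hiv : PySem.List.pyGetD (w.2.2 :: List.map (fun x => x.2.2) (z :: mm)) 1 0 -
            PySem.List.pyGetD (w.2.2 :: List.map (fun x => x.2.2) (z :: mm)) 0 0
            = z.2.2 - w.2.2 := by
          simp [pysem]
        rw [hiv, pvWhileA_eq_chain _ _ 2 (by omega)]
        simp only [List.map_cons, List.drop_succ_cons, List.drop_zero, List.getD_cons_succ,
          List.getD_cons_zero]
        rw [pvChain_eq_fold]
        simp only [pvSpecB]
      rw [e1, e2, e3]

-- ===== VERDICT (by name: the statement is the Claim_ definition above) =====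
theorem getRecurringTransactions_spec : Claim_equal_getRecurringTransactions := by
  intro array _
  unfold Spec_getRecurringTransactions
  rw [pvA_eq, pvB_eq]
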